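-- pv_equiv track=rewrite | github.com/helix-drop/OCRandTranslation | FNM_RE/stages/endnote_chapter_explorer.py | _find_chapter_by_number
-- ===== SOURCE A (Python) =====
-- from typing import Any, Mapping
--
-- def _find_chapter_by_number(number_value: int, chapters: list[dict[str, Any]]) -> dict[str, Any] | None:
--     if int(number_value or 0) <= 0:
--         return None
--     for row in chapters:
--         if int(row.get("number_value") or 0) == int(number_value):
--             return row
--     for row in chapters:
--         if int(row.get("numbered_order_index") or 0) == int(number_value):
--             return row
--     return None
-- ===== SOURCE B (Python) =====
-- from typing import Any
--
-- def _find_chapter_by_number(number_value: int, chapters: list[dict[str, Any]]) -> dict[str, Any] | None: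
--     if int(number_value or 0) <= 0:
--         return None
--     fallback = None
--     for row in chapters:
--         if int(row.get("number_value") or 0) == int(number_value):
--             return row
--         if fallback is None and int(row.get("numbered_order_index") or 0) == int(number_value):
--             fallback = row
--     return fallback
-- ===== Notes on version B (the rewrite author's own statement) =====
-- stated objective: simpler
-- what changed: Replaces A's two sequential scans over chapters with a single pass that returns eagerly on a number_value match and remembers the first numbered_order_index match in a fallback variable returned at the end.
import Mathlib
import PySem

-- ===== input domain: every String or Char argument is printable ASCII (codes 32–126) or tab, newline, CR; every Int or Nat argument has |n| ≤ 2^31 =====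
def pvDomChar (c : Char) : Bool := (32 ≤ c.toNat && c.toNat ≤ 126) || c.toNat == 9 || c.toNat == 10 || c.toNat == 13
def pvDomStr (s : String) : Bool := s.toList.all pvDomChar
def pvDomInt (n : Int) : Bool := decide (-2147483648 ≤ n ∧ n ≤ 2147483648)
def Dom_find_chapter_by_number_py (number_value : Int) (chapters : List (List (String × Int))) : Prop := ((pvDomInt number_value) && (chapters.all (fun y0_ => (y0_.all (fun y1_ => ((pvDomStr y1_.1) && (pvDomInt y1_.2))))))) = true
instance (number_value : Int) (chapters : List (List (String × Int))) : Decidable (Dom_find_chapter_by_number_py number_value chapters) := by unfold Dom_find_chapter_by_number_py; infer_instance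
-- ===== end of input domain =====

-- B replaces A's two sequential scans with one pass keeping a 'fallback' variable (objective: simpler).
-- ===== PORT A =====
-- int(row.get(k) or 0): a missing key or a stored 0 both yield 0, i.e. Dict.getD row k 0 (exact)
def find_chapter_by_number_py (number_value : Int) (chapters : List (List (String × Int))) : Option (List (String × Int)) :=
  if number_value ≤ 0 then none
  else
    match chapters.find? (fun row => PySem.Dict.getD (PySem.Dict.mk row) "number_value" 0 == number_value) with
    | some row => some row
    | none => chapters.find? (fun row => PySem.Dict.getD (PySem.Dict.mk row) "numbered_order_index" 0 == number_value)

-- ===== PORT B =====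
def pvAltLoop (number_value : Int) (fallback : Option (List (String × Int))) :
    List (List (String × Int)) → Option (List (String × Int))
  | [] => fallback
  | row :: rest =>
    if PySem.Dict.getD (PySem.Dict.mk row) "number_value" 0 == number_value then some row
    else if fallback.isNone && (PySem.Dict.getD (PySem.Dict.mk row) "numbered_order_index" 0 == number_value) then
      pvAltLoop number_value (some row) rest
    else pvAltLoop number_value fallback rest

def find_chapter_by_number_py_alt (number_value : Int) (chapters : List (List (String × Int))) : Option (List (String × Int)) :=
  if number_value ≤ 0 then none
  else pvAltLoop number_value none chapters

-- ===== PRECONDITION & SPEC =====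
def Spec_find_chapter_by_number_py (number_value : Int) (chapters : List (List (String × Int))) (out : Option (List (String × Int))) : Prop := out = find_chapter_by_number_py_alt number_value chapters
instance (number_value : Int) (chapters : List (List (String × Int))) (out : Option (List (String × Int))) : Decidable (Spec_find_chapter_by_number_py number_value chapters out) := by unfold Spec_find_chapter_by_number_py; infer_instance

-- ===== CLAIM (what is proved, stated in full; the proofs are below) =====
def Claim_equal_find_chapter_by_number_py : Prop := ∀ (number_value : Int) (chapters : List (List (String × Int))), Dom_find_chapter_by_number_py number_value chapters → Spec_find_chapter_by_number_py number_value chapters (find_chapter_by_number_py number_value chapters)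

-- ===== LEMMAS AND PROOFS =====

-- ===== VERDICT (by name: the statement is the Claim_ definition above) =====
-- loop invariant: the one-pass loop with a pending fallback computes A's two-scan result
theorem pvAltLoop_eq (n : Int) (fb : Option (List (String × Int))) (l : List (List (String × Int))) :
    pvAltLoop n fb l =
      match l.find? (fun row => PySem.Dict.getD (PySem.Dict.mk row) "number_value" 0 == n) with
      | some row => some row
      | none =>
        match fb with
        | some r => some r
        | none => l.find? (fun row => PySem.Dict.getD (PySem.Dict.mk row) "numbered_order_index" 0 == n) := by
  induction l generalizing fb with
  | nil => cases fb <;> simp [pvAltLoop]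
  | cons row rest ih =>
    by_cases h1 : (PySem.Dict.getD (PySem.Dict.mk row) "number_value" 0 == n) = true
    · simp [pvAltLoop, h1, List.find?]
    · cases fb with
      | some r =>
        simp [pvAltLoop, h1, List.find?, ih]
      | none =>
        by_cases h2 : (PySem.Dict.getD (PySem.Dict.mk row) "numbered_order_index" 0 == n) = true
        · simp [pvAltLoop, h1, h2, List.find?, ih]
        · simp [pvAltLoop, h1, h2, List.find?, ih]

theorem find_chapter_by_number_py_spec : Claim_equal_find_chapter_by_number_py := by
  intro n chapters _
  unfold Spec_find_chapter_by_number_py find_chapter_by_number_py find_chapter_by_number_py_alt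
  by_cases h : n ≤ 0
  · simp [h]
  · simp [h, pvAltLoop_eq]
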